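-- pv_equiv track=rewrite | github.com/IES-Rafael-Alberti/1dam-u2-excepciones-depuraci-n-y-documentaci-n-jfertri853 | src/P2_3/Ejercicio3_1.py | contar_edad
-- ===== SOURCE A (Python) =====
-- def contar_edad(edad: int = 1) -> str:
--     """Count each year from 1 to your current age
--
--     Args:
--         edad (int): Your current age which is 1 if no value given
--
--     Returns:
--         cadena (str): every year from 1 to current age separated by ","
--     """
--     cadena = "Has cumplido: "
--     for i in range(1, edad + 1):
--         if i == edad:
--             cadena += str(i)
--         elif i == edad - 1:
--             cadena += str(i) + " y "
--         else:
--             cadena += str(i) + ", "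
--     cadena += " años"
--     return cadena
-- ===== SOURCE B (Python) =====
-- def contar_edad(edad: int = 1) -> str:
--     """Count each year from 1 to your current age (materialize-then-join)."""
--     parts = [str(i) for i in range(1, edad + 1)]
--     if not parts:
--         body = ""
--     elif len(parts) == 1:
--         body = parts[0]
--     else:
--         body = ", ".join(parts[:-1]) + (" y " + parts[-1])
--     return "Has cumplido: " + (body + " años")
-- ===== Notes on version B (the rewrite author's own statement) =====
-- stated objective: idiomatic
-- what changed: Replaces A's per-iteration separator branching inside the loop by a materialize-then-join decomposition: build the list of year strings once, then assemble the body with ', '.join on all but the last plus ' y ' before the last.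
import Mathlib
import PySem

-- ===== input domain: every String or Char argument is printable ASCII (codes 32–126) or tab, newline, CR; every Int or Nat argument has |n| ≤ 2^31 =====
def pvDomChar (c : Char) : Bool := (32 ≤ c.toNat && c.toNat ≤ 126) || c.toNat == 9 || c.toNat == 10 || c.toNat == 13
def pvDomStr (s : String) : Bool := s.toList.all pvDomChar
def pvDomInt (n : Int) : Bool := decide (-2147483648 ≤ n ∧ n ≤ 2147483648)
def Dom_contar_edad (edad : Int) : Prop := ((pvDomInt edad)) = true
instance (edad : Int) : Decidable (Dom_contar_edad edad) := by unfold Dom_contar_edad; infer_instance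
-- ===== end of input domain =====

-- B replaces A's per-iteration separator branching with a materialize-then-join decomposition (idiomatic; same cost).

-- ===== PORT A =====
def contar_edad (edad : Int) : String :=
  let cadena : String := "Has cumplido: "
  let cadena := (PySem.List.pyRange 1 (edad + 1) 1).foldl
    (fun cadena i =>
      if i = edad then cadena ++ PySem.Int.toStr i
      else if i = edad - 1 then cadena ++ (PySem.Int.toStr i ++ " y ")
      else cadena ++ (PySem.Int.toStr i ++ ", ")) cadena
  cadena ++ " años"

-- ===== PORT B =====
def contar_edad_alt (edad : Int) : String :=
  let parts := (PySem.List.pyRange 1 (edad + 1) 1).map PySem.Int.toStr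
  let body : String :=
    if parts = [] then ""
    else if parts.length = 1 then PySem.List.pyGetD parts 0 ""
    else PySem.Str.join ", " (PySem.List.slice parts none (some (-1))) ++
           (" y " ++ PySem.List.pyGetD parts (-1) "")
  "Has cumplido: " ++ (body ++ " años")

-- ===== PRECONDITION & SPEC =====
def Spec_contar_edad (edad : Int) (out : String) : Prop := out = contar_edad_alt edad
instance (edad : Int) (out : String) : Decidable (Spec_contar_edad edad out) := by unfold Spec_contar_edad; infer_instance

-- ===== CLAIM (what is proved, stated in full; the proofs are below) =====
def Claim_equal_contar_edad : Prop := ∀ (edad : Int), Dom_contar_edad edad → Spec_contar_edad edad (contar_edad edad)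

-- ===== LEMMAS AND PROOFS =====

-- the chars of str(i) ++ ", " for one "middle" year, and their concatenation over 1..m-1
def pvSeg (i : Int) : List Char := PySem.Int.toChars i ++ (", ".toList)
def pvMid (m : Int) : List Char := (PySem.List.pyRange 1 m 1).flatMap pvSeg

-- A's loop over the years 1..m-1 (all strictly below edad-1) only takes the ", " branch
theorem pv_foldA (edad : Int) :
    ∀ m : Int, 1 ≤ m → m ≤ edad - 1 → ∀ s : String,
      ((PySem.List.pyRange 1 m 1).foldl
        (fun cadena i =>
          if i = edad then cadena ++ PySem.Int.toStr i
          else if i = edad - 1 then cadena ++ (PySem.Int.toStr i ++ " y ")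
          else cadena ++ (PySem.Int.toStr i ++ ", ")) s).toList
      = s.toList ++ pvMid m := by
  intro m hm
  induction m, hm using Int.le_induction with
  | base =>
    intro _ s
    simp [PySem.List.pyRange_one_eq_nil (by omega : (1:Int) ≤ 1), pvMid]
  | succ n hn ih =>
    intro hle s
    rw [PySem.List.pyRange_one_succ_right hn, List.foldl_append]
    have h1 : ¬ (n = edad) := by omega
    have h2 : ¬ (n = edad - 1) := by omega
    simp only [List.foldl_cons, List.foldl_nil, h1, h2, if_false, String.toList_append]
    rw [ih (by omega) s]
    simp [pvMid, PySem.List.pyRange_one_succ_right hn, pvSeg,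
      PySem.Int.toList_toStr, List.append_assoc]

-- ", ".join applied to str(a), …, str(m) equals the middle segments a..m-1 followed by str(m)
theorem pv_join (k : Nat) :
    ∀ a m : Int, a ≤ m → m - a = (k : Int) →
      PySem.Chars.join (", ".toList)
          (((PySem.List.pyRange a (m + 1) 1).map PySem.Int.toStr).map String.toList)
        = ((PySem.List.pyRange a m 1).flatMap pvSeg) ++ PySem.Int.toChars m := by
  induction k with
  | zero =>
    intro a m ha hk
    have ham : a = m := by omega
    subst ham
    rw [PySem.List.pyRange_one_singleton, PySem.List.pyRange_one_eq_nil (by omega)]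
    simp [PySem.Chars.join_singleton, PySem.Int.toList_toStr]
  | succ k ih =>
    intro a m ha hk
    have halt : a < m := by omega
    rw [PySem.List.pyRange_one_cons (by omega : a < m + 1)]
    rw [PySem.List.pyRange_one_cons (by omega : a + 1 < m + 1)]
    simp only [List.map_cons]
    rw [PySem.Chars.join_cons_cons]
    rw [← List.map_cons, ← List.map_cons, ← PySem.List.pyRange_one_cons (by omega : a + 1 < m + 1)]
    rw [ih (a + 1) m (by omega) (by omega)]
    rw [PySem.List.pyRange_one_cons halt]
    simp [pvSeg, PySem.Int.toList_toStr, List.append_assoc]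

theorem pv_toList_eq (edad : Int) : (contar_edad edad).toList = (contar_edad_alt edad).toList := by
  rcases lt_trichotomy edad 1 with h0 | h1 | h2
  · -- edad ≤ 0: empty range on both sides
    simp [contar_edad, contar_edad_alt,
      PySem.List.pyRange_one_eq_nil (by omega : edad + 1 ≤ 1)]
  · -- edad = 1: a single year, no separator
    subst h1; decide
  · -- edad ≥ 2
    -- A side: split the range at edad - 1
    have hsplitA : PySem.List.pyRange 1 (edad + 1) 1
        = PySem.List.pyRange 1 (edad - 1) 1 ++ [edad - 1, edad] := by
      rw [PySem.List.pyRange_one_append 1 (edad - 1) (edad + 1) (by omega) (by omega),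
        PySem.List.pyRange_one_cons (by omega : edad - 1 < edad + 1),
        show edad - 1 + 1 = edad from by omega,
        PySem.List.pyRange_one_singleton edad]
    -- B side: parts = map str (range 1 edad) ++ [str edad]
    have hsplitB : PySem.List.pyRange 1 (edad + 1) 1 = PySem.List.pyRange 1 edad 1 ++ [edad] :=
      PySem.List.pyRange_one_succ_right (by omega)
    simp only [contar_edad, contar_edad_alt]
    conv_lhs => rw [hsplitA]
    conv_rhs => rw [hsplitB]
    rw [List.foldl_append]
    have hA := pv_foldA edad (edad - 1) (by omega) (by omega) "Has cumplido: "
    have hxa : ¬ ((edad - 1 : Int) = edad) := by omega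
    have hxb : ¬ (edad = edad - 1) := by omega
    simp only [List.foldl_cons, List.foldl_nil, List.map_append, List.map_cons, List.map_nil,
      hxa, hxb, if_false, if_true, List.length_append, List.length_cons, List.length_nil]
    split_ifs with hc1 hc2
    · exact absurd hc1 (by simp)
    · exfalso; simp at hc2; omega
    · rw [PySem.List.slice_to_neg_one, List.dropLast_concat,
        PySem.List.pyGetD_neg_one_append_singleton]
      have hJ := pv_join (edad - 2).toNat 1 (edad - 1) (by omega)
        (by omega : edad - 1 - 1 = ((edad - 2).toNat : Int))
      rw [show edad - 1 + 1 = edad from by omega] at hJ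
      have hjoin : (PySem.Str.join ", " ((PySem.List.pyRange 1 edad 1).map PySem.Int.toStr)).toList
          = ((PySem.List.pyRange 1 (edad - 1) 1).flatMap pvSeg) ++ PySem.Int.toChars (edad - 1) := by
        rw [← hJ]; simp [PySem.Str.join]
      simp [String.toList_append, hA, hjoin, pvMid, PySem.Int.toList_toStr, List.append_assoc]
-- ===== VERDICT (by name: the statement is the Claim_ definition above) =====
theorem contar_edad_spec : Claim_equal_contar_edad := by
  intro edad _
  exact String.toList_injective (pv_toList_eq edad)
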